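-- pv_equiv track=rewrite | github.com/himitery/Algorithm | programmers/python/2025_프로그래머스_코드챌린지_1차_예선/홀짝트리/main.py | solution
-- ===== SOURCE A (Python) =====
-- from collections import deque
-- from typing import List, Dict, Set
--
-- def solution(nodes: List[int], edges: List[List[int]]) -> List[int]:
--     graph = {node: set() for node in nodes}
--     for x, y in edges:
--         graph[x].add(y)
--         graph[y].add(x)
--
--     count, trees = [0, 0], find_trees(graph)
--     for tree in trees:
--         root_count, candidate = [0, 0], [None, None]
--
--         for node in tree:
--             tree_type = 1 - int(node % 2 == len(graph[node]) % 2)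
--             root_count[tree_type] += 1
--             candidate[tree_type] = node
--
--         if root_count[0] == 1:
--             count[0] += 1
--         if root_count[1] == 1:
--             count[1] += 1
--
--     return count
--
-- def find_trees(graph: Dict[int, Set[int]]) -> List[Set[int]]:
--     trees, visited = [], set()
--     for node in graph:
--         if node in visited:
--             continue
--
--         tree, queue = {node}, deque([node])
--         while queue:
--             node = queue.popleft()
--             visited.add(node)
--
--             for child in graph[node]:
--                 if child not in visited:
--                     tree.add(child)
--                     queue.append(child)
--
--         trees.append(tree)
--
--     return trees
-- ===== SOURCE B (Python) =====
-- def solution(nodes, edges):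
--     graph = {node: set() for node in nodes}
--     for x, y in edges:
--         graph[x].add(y)
--         graph[y].add(x)
--     count0 = count1 = 0
--     assigned = set()
--     for n in graph:
--         if n in assigned:
--             continue
--         comp = {n}
--         for _ in range(len(graph)):
--             grown = comp | {w for v in comp for w in graph[v]}
--             if len(grown) == len(comp):
--                 break
--             comp = grown
--         assigned |= comp
--         t0 = sum(1 for v in comp if v % 2 == len(graph[v]) % 2)
--         if t0 == 1:
--             count0 += 1
--         if len(comp) - t0 == 1:
--             count1 += 1
--     return [count0, count1]
-- ===== Notes on version B (the rewrite author's own statement) =====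
-- stated objective: alternative
-- what changed: Replaces the global FIFO-queue BFS (shared visited set, trees list, then a second counting pass with mutable root_count/candidate 2-lists) by per-component neighborhood saturation to a fixed point (comp |= neighbors(comp) until it stops growing) with direct comprehension counting, deriving the odd-type count from the component size.
import Mathlib
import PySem

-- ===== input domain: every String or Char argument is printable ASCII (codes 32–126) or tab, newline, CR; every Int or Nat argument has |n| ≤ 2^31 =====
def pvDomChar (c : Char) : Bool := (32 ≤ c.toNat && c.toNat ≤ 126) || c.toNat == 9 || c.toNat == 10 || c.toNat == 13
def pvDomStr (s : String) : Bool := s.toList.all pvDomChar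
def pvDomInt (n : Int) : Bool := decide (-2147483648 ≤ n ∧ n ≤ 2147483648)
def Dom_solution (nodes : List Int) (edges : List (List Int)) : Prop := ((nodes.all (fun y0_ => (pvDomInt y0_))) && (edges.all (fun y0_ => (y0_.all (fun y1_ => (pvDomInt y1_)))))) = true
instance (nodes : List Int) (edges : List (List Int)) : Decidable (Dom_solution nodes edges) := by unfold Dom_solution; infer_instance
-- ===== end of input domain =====

-- B replaces A's global FIFO-queue BFS over a trees list (with mutable root_count/candidate
-- bookkeeping) by per-component neighborhood saturation to a fixed point with direct
-- comprehension counting; objective: alternative (not claimed faster).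

-- ===== PORT A =====

-- shared helper: both Pythons build `graph = {node: set() for node in nodes}` then add both
-- endpoints of every edge.  An edge that is not a 2-list, or whose endpoint is not a key,
-- raises (ValueError/KeyError) in Python: those inputs are outside Pre_solution, the port
-- leaves the dict unchanged there (Dict.modify would create the key; inside Pre_ it exists).
def pvBuildGraph (nodes : List Int) (edges : List (List Int)) : PySem.Dict Int (PySem.Set Int) :=
  let g0 := nodes.foldl (fun d n => d.insert n PySem.Set.empty) PySem.Dict.empty
  edges.foldl (fun d e =>
    match e with
    | [x, y] =>
        (d.modify x PySem.Set.empty (fun s => PySem.Set.add s y)).modify y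
          PySem.Set.empty (fun s => PySem.Set.add s x)
    | _ => d) g0

-- termination measure for the BFS while-loop (not part of the computation)
def pvBase (g : PySem.Dict Int (PySem.Set Int)) (queue : List Int) : Finset Int :=
  (g.keys ++ g.values.flatten ++ queue).toFinset

def pvMeas (g : PySem.Dict Int (PySem.Set Int)) (visited : PySem.Set Int) (queue : List Int) :
    Nat × Nat :=
  (((pvBase g queue).filter (fun x => ¬ (PySem.Set.contains visited x = true))).card,
   queue.countP (fun x => PySem.Set.contains visited x))

-- the inner `for child in graph[node]` loop, with the two accumulators separated
theorem pvScan (vis' : PySem.Set Int) (children : List Int) :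
    ∀ (tree : PySem.Set Int) (rest : List Int),
    children.foldl (fun (tq : PySem.Set Int × List Int) c =>
        if PySem.Set.contains vis' c then tq else (PySem.Set.add tq.1 c, tq.2 ++ [c]))
      (tree, rest)
    = (children.foldl (fun t c => if PySem.Set.contains vis' c then t else PySem.Set.add t c) tree,
       rest ++ children.filter (fun c => !PySem.Set.contains vis' c)) := by
  induction children with
  | nil => intro tree rest; simp
  | cons c cs ih =>
    intro tree rest
    by_cases h : PySem.Set.contains vis' c = true
    · simp only [List.foldl_cons, List.filter_cons, h, Bool.not_true, Bool.false_eq_true,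
        if_false, if_true]
      exact ih tree rest
    · simp only [List.foldl_cons, List.filter_cons, h, Bool.not_false, Bool.false_eq_true,
        if_false, if_true]
      rw [ih]
      simp

theorem pvChild_mem {g : PySem.Dict Int (PySem.Set Int)} {v c : Int}
    (h : c ∈ (g.getD v PySem.Set.empty : List Int)) : c ∈ g.values.flatten := by
  cases hcv : g.get? v with
  | none =>
    rw [PySem.Dict.getD_of_get?_eq_none _ _ hcv] at h
    simp [PySem.Set.empty] at h
  | some s =>
    rw [PySem.Dict.getD_of_get?_eq_some _ _ hcv] at h
    have : (v, s) ∈ g.items := PySem.Dict.mem_items_of_get?_eq_some _ hcv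
    exact List.mem_flatten.2 ⟨s, by simpa [PySem.Dict.values] using ⟨v, this⟩, h⟩

theorem pvMeas_dec (g : PySem.Dict Int (PySem.Set Int)) (visited : PySem.Set Int)
    (v : Int) (rest : List Int) :
    Prod.Lex (· < ·) (· < ·)
      (pvMeas g (PySem.Set.add visited v)
        (rest ++ (g.getD v PySem.Set.empty : List Int).filter
          (fun c => !PySem.Set.contains (PySem.Set.add visited v) c)))
      (pvMeas g visited (v :: rest)) := by
  by_cases hv : PySem.Set.contains visited v = true
  · have hadd : PySem.Set.add visited v = visited :=
      PySem.Set.add_of_mem ((PySem.Set.contains_iff _ _).1 hv)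
    rw [hadd]
    unfold pvMeas
    have hfst : ((pvBase g (rest ++ (g.getD v PySem.Set.empty : List Int).filter
          (fun c => !PySem.Set.contains visited c))).filter
            (fun x => ¬ (PySem.Set.contains visited x = true)))
        = ((pvBase g (v :: rest)).filter (fun x => ¬ (PySem.Set.contains visited x = true))) := by
      apply Finset.ext
      intro x
      simp only [Finset.mem_filter, pvBase, List.mem_toFinset, List.mem_append, List.mem_cons,
        List.mem_filter, Bool.not_eq_true']
      constructor
      · rintro ⟨hx, hnx⟩
        refine ⟨?_, hnx⟩
        rcases hx with (h | h) | (h | ⟨h, _⟩)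
        · exact Or.inl (Or.inl h)
        · exact Or.inl (Or.inr h)
        · exact Or.inr (Or.inr h)
        · exact Or.inl (Or.inr (pvChild_mem h))
      · rintro ⟨hx, hnx⟩
        refine ⟨?_, hnx⟩
        rcases hx with (h | h) | (h | h)
        · exact Or.inl (Or.inl h)
        · exact Or.inl (Or.inr h)
        · exact absurd hv (by simpa [h] using hnx)
        · exact Or.inr (Or.inl h)
    rw [hfst]
    apply Prod.Lex.right
    have happ : ((g.getD v PySem.Set.empty : List Int).filter
        (fun c => !PySem.Set.contains visited c)).countP
          (fun x => PySem.Set.contains visited x) = 0 := by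
      rw [List.countP_filter]
      apply List.countP_eq_zero.2
      intro a _
      simp
    have hv' : v ∈ visited := (PySem.Set.contains_iff _ _).1 hv
    have happ' : List.countP (fun x => decide (x ∈ visited))
        (List.filter (fun c => !decide (c ∈ visited)) (g.getD v [])) = 0 := by
      rw [List.countP_filter]; apply List.countP_eq_zero.2; intro a _; simp
    simp [List.countP_append, hv', happ']
  · apply Prod.Lex.left
    apply Finset.card_lt_card
    constructor
    · intro x hx
      simp only [Finset.mem_filter, pvBase, List.mem_toFinset, List.mem_append, List.mem_cons,
        List.mem_filter] at hx ⊢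
      rcases hx with ⟨hx, hnx⟩
      have hnxv : ¬ (PySem.Set.contains visited x = true) := by
        intro hc
        exact hnx (by
          rcases (PySem.Set.contains_iff _ _).1 hc with hmem
          exact (PySem.Set.contains_iff _ _).2 (by
            simpa [PySem.Set.mem_add] using Or.inl hmem))
      refine ⟨?_, hnxv⟩
      rcases hx with (h | h) | (h | ⟨h, _⟩)
      · exact Or.inl (Or.inl h)
      · exact Or.inl (Or.inr h)
      · exact Or.inr (Or.inr h)
      · exact Or.inl (Or.inr (pvChild_mem h))
    · intro hsub
      have hvnot : v ∉ visited := fun hm => hv ((PySem.Set.contains_iff _ _).2 hm)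
      have hvmem : v ∈ (pvBase g (v :: rest)).filter
          (fun x => ¬ (PySem.Set.contains visited x = true)) := by
        simp [pvBase, hvnot]
      have := hsub hvmem
      simp only [Finset.mem_filter] at this
      exact this.2 ((PySem.Set.contains_iff _ _).2
        ((PySem.Set.mem_add _ _ _).2 (Or.inr rfl)))

-- the BFS while-loop of find_trees; returns (visited, tree)
def pvBFS (g : PySem.Dict Int (PySem.Set Int)) (visited tree : PySem.Set Int)
    (queue : List Int) : PySem.Set Int × PySem.Set Int :=
  match queue with
  | [] => (visited, tree)
  | v :: rest =>
    let visited' := PySem.Set.add visited v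
    let tq := (g.getD v PySem.Set.empty : List Int).foldl
        (fun (tq : PySem.Set Int × List Int) c =>
          if PySem.Set.contains visited' c then tq else (PySem.Set.add tq.1 c, tq.2 ++ [c]))
        (tree, rest)
    pvBFS g visited' tq.1 tq.2
termination_by pvMeas g visited queue
decreasing_by
  simp only [dite_eq_ite]
  rw [pvScan]
  exact pvMeas_dec g visited v rest

def pvFindTrees (g : PySem.Dict Int (PySem.Set Int)) : List (PySem.Set Int) :=
  (g.keys.foldl (fun (st : List (PySem.Set Int) × PySem.Set Int) node =>
    if PySem.Set.contains st.2 node then st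
    else
      let r := pvBFS g st.2 (PySem.Set.ofList [node]) [node]
      (st.1 ++ [r.2], r.1)) ([], PySem.Set.empty)).1

-- tree_type = 1 - int(node % 2 == len(graph[node]) % 2); node is a key whenever Pre_ holds
def pvTreeType (graph : PySem.Dict Int (PySem.Set Int)) (node : Int) : Int :=
  1 - (if PySem.Int.mod node 2
          = PySem.Int.mod (PySem.Set.len (graph.getD node PySem.Set.empty)) 2 then 1 else 0)

-- the per-tree loop iterates a Python set; root_count (all that reaches the result) is
-- iteration-order independent, candidate is dead
def solution (nodes : List Int) (edges : List (List Int)) : List Int :=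
  let graph := pvBuildGraph nodes edges
  let trees := pvFindTrees graph
  trees.foldl (fun (count : List Int) tree =>
    let rc := tree.foldl (fun (st : List Int × List (Option Int)) node =>
      let t := pvTreeType graph node
      (PySem.List.pySetD st.1 t (PySem.List.pyGetD st.1 t 0 + 1),
       PySem.List.pySetD st.2 t (some node))) ([0, 0], [none, none])
    let count1 := if PySem.List.pyGetD rc.1 0 0 = 1
      then PySem.List.pySetD count 0 (PySem.List.pyGetD count 0 0 + 1) else count
    if PySem.List.pyGetD rc.1 1 0 = 1
      then PySem.List.pySetD count1 1 (PySem.List.pyGetD count1 1 0 + 1) else count1) [0, 0]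

-- ===== PORT B =====

-- comp = comp | {w for v in comp for w in graph[v]} until it stops growing (≤ len(graph) rounds)
def pvSaturate (g : PySem.Dict Int (PySem.Set Int)) (comp : PySem.Set Int) :
    Nat → PySem.Set Int
  | 0 => comp
  | Nat.succ fuel =>
    let grown := PySem.Set.union comp
      (comp.flatMap (fun v => (g.getD v PySem.Set.empty : List Int)))
    if PySem.Set.len grown = PySem.Set.len comp then comp
    else pvSaturate g grown fuel

def solution_alt (nodes : List Int) (edges : List (List Int)) : List Int :=
  let graph := pvBuildGraph nodes edges
  let res := graph.keys.foldl (fun (st : Int × Int × PySem.Set Int) n =>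
    if PySem.Set.contains st.2.2 n then st
    else
      let comp := pvSaturate graph (PySem.Set.ofList [n]) graph.keys.length
      let t0 := comp.foldl (fun (acc : Int) v =>
        if PySem.Int.mod v 2
            = PySem.Int.mod (PySem.Set.len (graph.getD v PySem.Set.empty)) 2
          then acc + 1 else acc) 0
      (if t0 = 1 then st.1 + 1 else st.1,
       (if PySem.Set.len comp - t0 = 1 then st.2.1 + 1 else st.2.1),
       PySem.Set.union st.2.2 comp)) (0, 0, PySem.Set.empty)
  [res.1, res.2.1]

-- ===== PRECONDITION & SPEC =====
-- Pre_ is exactly where A returns: every edge must be a 2-list (else unpacking raises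
-- ValueError) whose endpoints are keys of the graph dict (else KeyError).
def Pre_solution (nodes : List Int) (edges : List (List Int)) : Prop :=
  ∀ e ∈ edges, e.length = 2 ∧ ∀ v ∈ e, v ∈ nodes
instance (nodes : List Int) (edges : List (List Int)) : Decidable (Pre_solution nodes edges) := by
  unfold Pre_solution; infer_instance

def pvWitness_solution : List Int × List (List Int) := ([1, 2, 3, 4], [[1, 2], [3, 3]])

def Spec_solution (nodes : List Int) (edges : List (List Int)) (out : List Int) : Prop :=
  out = solution_alt nodes edges
instance (nodes : List Int) (edges : List (List Int)) (out : List Int) :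
    Decidable (Spec_solution nodes edges out) := by unfold Spec_solution; infer_instance

-- ===== CLAIM (what is proved, stated in full; the proofs are below) =====
def Claim_equal_solution : Prop := ∀ (nodes : List Int) (edges : List (List Int)),
  Dom_solution nodes edges → Pre_solution nodes edges →
    Spec_solution nodes edges (solution nodes edges)


-- ===== LEMMAS AND PROOFS =====

def AdjG (g : PySem.Dict Int (PySem.Set Int)) (u v : Int) : Prop :=
  v ∈ (g.getD u PySem.Set.empty : List Int)

def ReachG (g : PySem.Dict Int (PySem.Set Int)) : Int → Int → Prop :=
  Relation.ReflTransGen (AdjG g)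

-- the dict comprehension: every value is the empty set
theorem pvG0_getD (nodes : List Int) :
    ∀ (d : PySem.Dict Int (PySem.Set Int)), (∀ u, d.getD u PySem.Set.empty = PySem.Set.empty) →
    ∀ u, ((nodes.foldl (fun d n => d.insert n PySem.Set.empty) d).getD u PySem.Set.empty)
      = PySem.Set.empty := by
  induction nodes with
  | nil => intro d hd u; exact hd u
  | cons n ns ih =>
    intro d hd u
    refine ih _ (fun w => ?_) u
    rw [PySem.Dict.getD_insert]
    split
    · rfl
    · exact hd _

theorem pvEdgeStep_getD (d : PySem.Dict Int (PySem.Set Int)) (x y u v : Int) :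
    (v ∈ (((d.modify x PySem.Set.empty (fun s => PySem.Set.add s y)).modify y
        PySem.Set.empty (fun s => PySem.Set.add s x)).getD u PySem.Set.empty : List Int))
    ↔ (v ∈ (d.getD u PySem.Set.empty : List Int) ∨ (u = x ∧ v = y) ∨ (u = y ∧ v = x)) := by
  by_cases huy : u = y
  · subst huy
    by_cases hux : u = x
    · subst hux
      simp [PySem.Set.mem_add]
    · simp [PySem.Dict.getD_modify, hux, PySem.Set.mem_add]
  · by_cases hux : u = x
    · subst hux
      simp [PySem.Dict.getD_modify, huy, PySem.Set.mem_add]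
    · simp [PySem.Dict.getD_modify, huy, hux]

theorem pvEdges_getD (edges : List (List Int)) :
    ∀ (d : PySem.Dict Int (PySem.Set Int)) (u v : Int),
    (v ∈ ((edges.foldl (fun d e =>
        match e with
        | [x, y] => (d.modify x PySem.Set.empty (fun s => PySem.Set.add s y)).modify y
            PySem.Set.empty (fun s => PySem.Set.add s x)
        | _ => d) d).getD u PySem.Set.empty : List Int))
    ↔ (v ∈ (d.getD u PySem.Set.empty : List Int) ∨ ∃ e ∈ edges, e = [u, v] ∨ e = [v, u]) := by
  induction edges with
  | nil => intro d u v; simp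
  | cons e es ih =>
    intro d u v
    rw [List.foldl_cons, ih]
    match e with
    | [] => simp
    | [x] => simp
    | x :: y :: z :: t => simp
    | [x, y] =>
      rw [pvEdgeStep_getD]
      constructor
      · rintro (((h | ⟨hu, hv⟩ | ⟨hu, hv⟩) | ⟨e', he', h⟩))
        · exact Or.inl h
        · exact Or.inr ⟨[x, y], by simp, by subst hu hv; simp⟩
        · exact Or.inr ⟨[x, y], by simp, by subst hu hv; simp⟩
        · exact Or.inr ⟨e', by simp [he'], h⟩
      · rintro (h | ⟨e', he', h⟩)
        · exact Or.inl (Or.inl h)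
        · rcases List.mem_cons.1 he' with he'' | he''
          · subst he''
            rcases h with h | h
            · obtain ⟨rfl, rfl⟩ : x = u ∧ y = v := by simpa using h
              exact Or.inl (Or.inr (Or.inl ⟨rfl, rfl⟩))
            · obtain ⟨rfl, rfl⟩ : x = v ∧ y = u := by simpa using h
              exact Or.inl (Or.inr (Or.inr ⟨rfl, rfl⟩))
          · exact Or.inr ⟨e', he'', h⟩

theorem pvAdj_char (nodes : List Int) (edges : List (List Int)) (u v : Int) :
    AdjG (pvBuildGraph nodes edges) u v ↔ ∃ e ∈ edges, e = [u, v] ∨ e = [v, u] := by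
  unfold AdjG pvBuildGraph
  rw [pvEdges_getD]
  rw [pvG0_getD nodes PySem.Dict.empty (fun u => PySem.Dict.getD_empty u _)]
  simp [PySem.Set.empty]


theorem pvBuild_keys (nodes : List Int) (edges : List (List Int))
    (hpre : Pre_solution nodes edges) :
    (∀ k, k ∈ (pvBuildGraph nodes edges).keys ↔ k ∈ nodes) ∧
      (pvBuildGraph nodes edges).keys.Nodup := by
  have h0 : ∀ k, k ∈ (nodes.foldl (fun d n => d.insert n PySem.Set.empty)
      (PySem.Dict.empty : PySem.Dict Int (PySem.Set Int))).keys ↔ k ∈ nodes := by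
    intro k
    rw [PySem.Dict.keys_foldl_insert nodes (fun _ _ => PySem.Set.empty)]
    simp [PySem.Dict.keys_empty, PySem.Set.update_nil_left, PySem.Set.mem_ofList]
  have h0n : (nodes.foldl (fun d n => d.insert n PySem.Set.empty)
      (PySem.Dict.empty : PySem.Dict Int (PySem.Set Int))).keys.Nodup :=
    PySem.Dict.nodup_keys_foldl_insert nodes (fun _ _ => PySem.Set.empty) _
      PySem.Dict.nodup_keys_empty
  -- the edge loop never creates keys under Pre_
  suffices h : ∀ (es : List (List Int)), (∀ e ∈ es, e.length = 2 ∧ ∀ v ∈ e, v ∈ nodes) →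
      ∀ (d : PySem.Dict Int (PySem.Set Int)), (∀ k, k ∈ d.keys ↔ k ∈ nodes) → d.keys.Nodup →
      (∀ k, k ∈ (es.foldl (fun d e =>
        match e with
        | [x, y] => (d.modify x PySem.Set.empty (fun s => PySem.Set.add s y)).modify y
            PySem.Set.empty (fun s => PySem.Set.add s x)
        | _ => d) d).keys ↔ k ∈ nodes) ∧
      (es.foldl (fun d e =>
        match e with
        | [x, y] => (d.modify x PySem.Set.empty (fun s => PySem.Set.add s y)).modify y
            PySem.Set.empty (fun s => PySem.Set.add s x)
        | _ => d) d).keys.Nodup by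
    exact h edges hpre _ h0 h0n
  intro es
  induction es with
  | nil => intro _ d hd hdn; exact ⟨hd, hdn⟩
  | cons e es ih =>
    intro hes d hd hdn
    rw [List.foldl_cons]
    rcases hes e (List.mem_cons_self) with ⟨hlen, hmem⟩
    match e, hlen with
    | [x, y], _ =>
      have hx : x ∈ nodes := hmem x (by simp)
      have hy : y ∈ nodes := hmem y (by simp)
      refine ih (fun e' he' => hes e' (List.mem_cons_of_mem _ he')) _ (fun k => ?_) ?_
      · rw [PySem.Dict.keys_modify, PySem.Dict.mem_keys_insert, PySem.Dict.keys_modify,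
          PySem.Dict.mem_keys_insert, hd]
        constructor
        · rintro (rfl | rfl | h) <;> [exact hy; exact hx; exact h]
        · exact fun h => Or.inr (Or.inr h)
      · rw [PySem.Dict.keys_modify]
        apply PySem.Dict.nodup_keys_insert
        rw [PySem.Dict.keys_modify]
        exact PySem.Dict.nodup_keys_insert _ _ _ hdn

-- the inner `tree` accumulator of the BFS loop
theorem pvGrow_mem (vis' : PySem.Set Int) (children : List Int) :
    ∀ (tree : PySem.Set Int) (x : Int),
    (x ∈ children.foldl (fun t c => if PySem.Set.contains vis' c then t else PySem.Set.add t c)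
        tree
      ↔ x ∈ tree ∨ (x ∈ children ∧ x ∉ vis')) := by
  induction children with
  | nil => intro tree x; simp
  | cons c cs ih =>
    intro tree x
    by_cases h : PySem.Set.contains vis' c = true
    · rw [List.foldl_cons, if_pos h, ih]
      have hc : c ∈ vis' := (PySem.Set.contains_iff _ _).1 h
      constructor
      · rintro (h1 | ⟨h1, h2⟩) <;> [exact Or.inl h1; exact Or.inr ⟨List.mem_cons_of_mem _ h1, h2⟩]
      · rintro (h1 | ⟨h1, h2⟩)
        · exact Or.inl h1
        · rcases List.mem_cons.1 h1 with rfl | h1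
          · exact absurd hc h2
          · exact Or.inr ⟨h1, h2⟩
    · rw [List.foldl_cons, if_neg h, ih]
      have hc : c ∉ vis' := fun hm => h ((PySem.Set.contains_iff _ _).2 hm)
      rw [PySem.Set.mem_add]
      constructor
      · rintro ((h1 | rfl) | ⟨h1, h2⟩)
        · exact Or.inl h1
        · exact Or.inr ⟨List.mem_cons_self, hc⟩
        · exact Or.inr ⟨List.mem_cons_of_mem _ h1, h2⟩
      · rintro (h1 | ⟨h1, h2⟩)
        · exact Or.inl (Or.inl h1)
        · rcases List.mem_cons.1 h1 with rfl | h1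
          · exact Or.inl (Or.inr rfl)
          · exact Or.inr ⟨h1, h2⟩

theorem pvGrow_nodup (vis' : PySem.Set Int) (children : List Int) :
    ∀ (tree : PySem.Set Int), tree.Nodup →
    (children.foldl (fun t c => if PySem.Set.contains vis' c then t else PySem.Set.add t c)
        tree).Nodup := by
  induction children with
  | nil => intro tree h; exact h
  | cons c cs ih =>
    intro tree h
    rw [List.foldl_cons]
    by_cases hc : PySem.Set.contains vis' c = true
    · rw [if_pos hc]; exact ih tree h
    · rw [if_neg hc]; exact ih _ (PySem.Set.nodup_add _ _ h)


theorem pvBFS_spec (g : PySem.Dict Int (PySem.Set Int)) (start : Int) (V0 : PySem.Set Int)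
    (hV0r : ∀ x, ReachG g start x → x ∉ V0) :
    ∀ (visited tree : PySem.Set Int) (queue : List Int),
    visited.Nodup → tree.Nodup →
    (∀ x ∈ V0, x ∈ visited) →
    (∀ x ∈ tree, ReachG g start x) →
    (∀ x ∈ queue, x ∈ tree) →
    (∀ x ∈ tree, x ∈ visited ∨ x ∈ queue) →
    (∀ x ∈ visited, x ∈ V0 ∨ x ∈ tree) →
    (∀ u ∈ visited, u ∉ V0 → ∀ c, AdjG g u c → c ∈ tree) →
    start ∈ tree →
    ((pvBFS g visited tree queue).2.Nodup ∧
     (∀ x, x ∈ (pvBFS g visited tree queue).2 ↔ ReachG g start x) ∧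
     (pvBFS g visited tree queue).1.Nodup ∧
     (∀ x, x ∈ (pvBFS g visited tree queue).1 ↔ x ∈ visited ∨ x ∈ (pvBFS g visited tree queue).2)) := by
  intro visited tree queue
  fun_induction pvBFS g visited tree queue with
  | case1 visited tree =>
    intro hnv hnt hV0 hI3 hI4a hI4b hI4c hI6 hstart
    have htv : ∀ x ∈ tree, x ∈ visited := by
      intro x hx
      rcases hI4b x hx with h | h
      · exact h
      · simp at h
    refine ⟨hnt, fun x => ⟨hI3 x, fun hx => ?_⟩, hnv, fun x => ⟨fun h => Or.inl h, ?_⟩⟩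
    · induction hx with
      | refl => exact hstart
      | tail h1 h2 ih2 =>
        rename_i b c
        have hb : b ∈ visited := htv _ ih2
        have hbV0 : b ∉ V0 := hV0r b (hI3 b ih2)
        exact hI6 b hb hbV0 c h2
    · rintro (h | h)
      · exact h
      · exact htv x h
  | case2 visited tree v rest visited' tq ih =>
    have htq : tq = ((g.getD v PySem.Set.empty : List Int).foldl
        (fun t c => if PySem.Set.contains visited' c then t else PySem.Set.add t c) tree,
        rest ++ (g.getD v PySem.Set.empty : List Int).filter
          (fun c => !PySem.Set.contains visited' c)) := by
      simp only [tq, dite_eq_ite]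
      exact pvScan visited' _ tree rest
    rw [htq] at ih ⊢
    intro hnv hnt hV0 hI3 hI4a hI4b hI4c hI6 hstart
    have hvtree : v ∈ tree := hI4a v List.mem_cons_self
    have hvreach : ReachG g start v := hI3 v hvtree
    have hvV0 : v ∉ V0 := hV0r v hvreach
    have hmemvis' : ∀ x, x ∈ visited' ↔ x ∈ visited ∨ x = v :=
      fun x => PySem.Set.mem_add visited v x
    have hmemtree' : ∀ x, x ∈ (g.getD v PySem.Set.empty : List Int).foldl
        (fun t c => if PySem.Set.contains visited' c then t else PySem.Set.add t c) tree
        ↔ x ∈ tree ∨ (x ∈ (g.getD v PySem.Set.empty : List Int) ∧ x ∉ visited') :=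
      fun x => pvGrow_mem visited' _ tree x
    have htsub : ∀ x ∈ tree, x ∈ (g.getD v PySem.Set.empty : List Int).foldl
        (fun t c => if PySem.Set.contains visited' c then t else PySem.Set.add t c) tree :=
      fun x hx => (hmemtree' x).2 (Or.inl hx)
    have happ : ∀ x, x ∈ (g.getD v PySem.Set.empty : List Int).filter
        (fun c => !PySem.Set.contains visited' c)
        ↔ x ∈ (g.getD v PySem.Set.empty : List Int) ∧ x ∉ visited' := by
      intro x
      rw [List.mem_filter]
      constructor
      · rintro ⟨h1, h2⟩
        have hcf : PySem.Set.contains visited' x = false := by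
          revert h2; cases PySem.Set.contains visited' x <;> simp
        exact ⟨h1, fun hm => by rw [(PySem.Set.contains_iff _ _).2 hm] at hcf; cases hcf⟩
      · rintro ⟨h1, h2⟩
        have hcf : PySem.Set.contains visited' x = false := by
          cases hcb : PySem.Set.contains visited' x with
          | false => rfl
          | true => exact absurd ((PySem.Set.contains_iff _ _).1 hcb) h2
        exact ⟨h1, by rw [Bool.not_eq_true']; exact hcf⟩
    have hres := ih (PySem.Set.nodup_add _ _ hnv) (pvGrow_nodup _ _ _ hnt)
      (fun x hx => (hmemvis' x).2 (Or.inl (hV0 x hx)))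
      (fun x hx => by
        rcases (hmemtree' x).1 hx with h | ⟨h, _⟩
        · exact hI3 x h
        · exact Relation.ReflTransGen.tail hvreach h)
      (fun x hx => by
        rcases List.mem_append.1 hx with h | h
        · exact htsub x (hI4a x (List.mem_cons_of_mem _ h))
        · rcases (happ x).1 h with ⟨h1, h2⟩
          exact (hmemtree' x).2 (Or.inr ⟨h1, h2⟩))
      (fun x hx => by
        rcases (hmemtree' x).1 hx with h | ⟨h1, h2⟩
        · rcases hI4b x h with h' | h'
          · exact Or.inl ((hmemvis' x).2 (Or.inl h'))
          · rcases List.mem_cons.1 h' with rfl | h''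
            · exact Or.inl ((hmemvis' x).2 (Or.inr rfl))
            · exact Or.inr (List.mem_append.2 (Or.inl h''))
        · exact Or.inr (List.mem_append.2 (Or.inr ((happ x).2 ⟨h1, h2⟩))))
      (fun x hx => by
        rcases (hmemvis' x).1 hx with h | rfl
        · rcases hI4c x h with h' | h'
          · exact Or.inl h'
          · exact Or.inr (htsub x h')
        · exact Or.inr (htsub x hvtree))
      (fun u hu huV0 c hadj => by
        rcases (hmemvis' u).1 hu with h | rfl
        · exact htsub c (hI6 u h huV0 c hadj)
        · by_cases hcv : c ∈ visited'
          · rcases (hmemvis' c).1 hcv with h' | rfl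
            · rcases hI4c c h' with h'' | h''
              · exact absurd h'' (hV0r c (Relation.ReflTransGen.tail hvreach hadj))
              · exact htsub c h''
            · exact htsub c hvtree
          · exact (hmemtree' c).2 (Or.inr ⟨hadj, hcv⟩))
      (htsub start hstart)
    refine ⟨hres.1, hres.2.1, hres.2.2.1, fun x => ?_⟩
    rw [hres.2.2.2 x, hmemvis' x]
    constructor
    · rintro ((h | rfl) | h)
      · exact Or.inl h
      · exact Or.inr ((hres.2.1 x).2 hvreach)
      · exact Or.inr h
    · rintro (h | h)
      · exact Or.inl (Or.inl h)
      · exact Or.inr h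

theorem pvNodupSubsetLen {l1 l2 : List Int} (h1 : l1.Nodup) (hs : l1 ⊆ l2) :
    l1.length ≤ l2.length := by
  have e1 := List.toFinset_card_of_nodup h1
  have h2 : l1.toFinset ⊆ l2.toFinset := by intro a ha; simp at ha ⊢; exact hs ha
  have := Finset.card_le_card h2
  have h3 := List.toFinset_card_le l2
  omega

theorem pvSaturate_spec (g : PySem.Dict Int (PySem.Set Int))
    (hcl : ∀ u v, AdjG g u v → v ∈ g.keys) (n : Int) :
    ∀ (fuel : Nat) (comp : PySem.Set Int), comp.Nodup →
    (∀ x ∈ comp, ReachG g n x) → n ∈ comp → (∀ x ∈ comp, x ∈ g.keys) →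
    g.keys.length < fuel + comp.length →
    ((pvSaturate g comp fuel).Nodup ∧ ∀ x, x ∈ pvSaturate g comp fuel ↔ ReachG g n x) := by
  intro fuel
  induction fuel with
  | zero =>
    intro comp hnd hr hn hk hlen
    exact absurd (pvNodupSubsetLen hnd hk) (by omega)
  | succ fuel ih =>
    intro comp hnd hr hn hk hlen
    rw [pvSaturate]
    have hsplit := PySem.Set.update_eq_append_filter comp
      (comp.flatMap (fun v => (g.getD v PySem.Set.empty : List Int)))
    by_cases hlen2 : PySem.Set.len (PySem.Set.union comp
        (comp.flatMap (fun v => (g.getD v PySem.Set.empty : List Int))))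
      = PySem.Set.len comp
    · rw [if_pos hlen2]
      have hrest : PySem.Set.union comp
          (comp.flatMap (fun v => (g.getD v PySem.Set.empty : List Int))) = comp := by
        have hl : (PySem.Set.union comp
            (comp.flatMap (fun v => (g.getD v PySem.Set.empty : List Int)))).length
            = comp.length := by
          simpa [PySem.Set.len] using hlen2
        rw [PySem.Set.union, hsplit] at hl ⊢
        have : (List.filter (fun y => !comp.contains y)
            (PySem.Set.ofList (comp.flatMap (fun v => (g.getD v PySem.Set.empty : List Int))))).length = 0 := by
          rw [List.length_append] at hl; omega
        rw [List.length_eq_zero_iff.1 this, List.append_nil]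
      have hclosed : ∀ v ∈ comp, ∀ c, AdjG g v c → c ∈ comp := by
        intro v hv c hadj
        have : c ∈ PySem.Set.union comp
            (comp.flatMap (fun v => (g.getD v PySem.Set.empty : List Int))) :=
          (PySem.Set.mem_union _ _ _).2 (Or.inr (List.mem_flatMap.2 ⟨v, hv, hadj⟩))
        rwa [hrest] at this
      refine ⟨hnd, fun x => ⟨hr x, fun hx => ?_⟩⟩
      induction hx with
      | refl => exact hn
      | tail h1 h2 ih2 => exact hclosed _ ih2 _ h2
    · rw [if_neg hlen2]
      have hgrow : (PySem.Set.union comp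
          (comp.flatMap (fun v => (g.getD v PySem.Set.empty : List Int)))).length
          > comp.length := by
        rw [PySem.Set.union, hsplit, List.length_append]
        rcases Nat.eq_zero_or_pos (List.filter (fun y => !comp.contains y)
            (PySem.Set.ofList (comp.flatMap (fun v => (g.getD v PySem.Set.empty : List Int))))).length with h0 | h0
        · exfalso
          apply hlen2
          simp only [PySem.Set.len, PySem.Set.union, hsplit, List.length_append]
          omega
        · omega
      refine ih _ (PySem.Set.nodup_union _ _ hnd) ?_ ?_ ?_ (by omega)
      · intro x hx
        rcases (PySem.Set.mem_union _ _ _).1 hx with h | h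
        · exact hr x h
        · rcases List.mem_flatMap.1 h with ⟨v, hv, hadj⟩
          exact Relation.ReflTransGen.tail (hr v hv) hadj
      · exact (PySem.Set.mem_union _ _ _).2 (Or.inl hn)
      · intro x hx
        rcases (PySem.Set.mem_union _ _ _).1 hx with h | h
        · exact hk x h
        · rcases List.mem_flatMap.1 h with ⟨v, _, hadj⟩
          exact hcl v x hadj

def pvP0 (graph : PySem.Dict Int (PySem.Set Int)) (v : Int) : Bool :=
  decide (PySem.Int.mod v 2 = PySem.Int.mod (PySem.Set.len (graph.getD v PySem.Set.empty)) 2)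

theorem pvSet0 {α : Type} (a b v : α) : PySem.List.pySetD [a, b] 0 v = [v, b] := rfl
theorem pvSet1 {α : Type} (a b v : α) : PySem.List.pySetD [a, b] 1 v = [a, v] := rfl
theorem pvGet0 (a b : Int) : PySem.List.pyGetD [a, b] 0 0 = a := rfl
theorem pvGet1 (a b : Int) : PySem.List.pyGetD [a, b] 1 0 = b := rfl

theorem pvRC (graph : PySem.Dict Int (PySem.Set Int)) (t : List Int) :
    ∀ (a b : Int) (cand : List (Option Int)),
    (t.foldl (fun (st : List Int × List (Option Int)) node =>
      let t := pvTreeType graph node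
      (PySem.List.pySetD st.1 t (PySem.List.pyGetD st.1 t 0 + 1),
       PySem.List.pySetD st.2 t (some node))) ([a, b], cand)).1
    = [a + (t.countP (pvP0 graph) : Int), b + (t.countP (fun v => !pvP0 graph v) : Int)] := by
  induction t with
  | nil => intro a b cand; simp
  | cons node t ih =>
    intro a b cand
    rw [List.foldl_cons]
    by_cases hp : pvP0 graph node = true
    · have htt : pvTreeType graph node = 0 := by
        unfold pvTreeType
        rw [if_pos (of_decide_eq_true hp)]
        ring
      simp only [htt, pvGet0, pvSet0]
      rw [ih]
      simp [hp]
      omega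
    · have hp' : pvP0 graph node = false := by
        cases hpb : pvP0 graph node
        · rfl
        · exact absurd hpb hp
      have htt : pvTreeType graph node = 1 := by
        unfold pvTreeType
        rw [if_neg (of_decide_eq_false hp')]
        ring
      simp only [htt, pvGet1, pvSet1]
      rw [ih]
      simp [hp']
      omega

theorem pvCountStep (graph : PySem.Dict Int (PySem.Set Int)) (tree : PySem.Set Int) (a b : Int) :
    (if PySem.List.pyGetD (tree.foldl (fun (st : List Int × List (Option Int)) node =>
        let t := pvTreeType graph node
        (PySem.List.pySetD st.1 t (PySem.List.pyGetD st.1 t 0 + 1),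
         PySem.List.pySetD st.2 t (some node))) ([0, 0], [none, none])).1 1 0 = 1
      then PySem.List.pySetD
        (if PySem.List.pyGetD (tree.foldl (fun (st : List Int × List (Option Int)) node =>
            let t := pvTreeType graph node
            (PySem.List.pySetD st.1 t (PySem.List.pyGetD st.1 t 0 + 1),
             PySem.List.pySetD st.2 t (some node))) ([0, 0], [none, none])).1 0 0 = 1
          then PySem.List.pySetD [a, b] 0 (PySem.List.pyGetD [a, b] 0 0 + 1) else [a, b]) 1
        (PySem.List.pyGetD
          (if PySem.List.pyGetD (tree.foldl (fun (st : List Int × List (Option Int)) node =>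
              let t := pvTreeType graph node
              (PySem.List.pySetD st.1 t (PySem.List.pyGetD st.1 t 0 + 1),
               PySem.List.pySetD st.2 t (some node))) ([0, 0], [none, none])).1 0 0 = 1
            then PySem.List.pySetD [a, b] 0 (PySem.List.pyGetD [a, b] 0 0 + 1) else [a, b]) 1 0 + 1)
      else (if PySem.List.pyGetD (tree.foldl (fun (st : List Int × List (Option Int)) node =>
          let t := pvTreeType graph node
          (PySem.List.pySetD st.1 t (PySem.List.pyGetD st.1 t 0 + 1),
           PySem.List.pySetD st.2 t (some node))) ([0, 0], [none, none])).1 0 0 = 1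
        then PySem.List.pySetD [a, b] 0 (PySem.List.pyGetD [a, b] 0 0 + 1) else [a, b]))
    = [a + (if tree.countP (pvP0 graph) = 1 then 1 else 0),
       b + (if tree.countP (fun v => !pvP0 graph v) = 1 then 1 else 0)] := by
  rw [pvRC graph tree 0 0 [none, none], pvGet0, pvGet1, pvGet0, pvSet0]
  generalize tree.countP (pvP0 graph) = n0
  generalize tree.countP (fun v => !pvP0 graph v) = n1
  by_cases h1 : n1 = 1
  · rw [if_pos (show (0:Int) + (n1:Int) = 1 by omega)]
    by_cases h0 : n0 = 1
    · rw [if_pos (show (0:Int) + (n0:Int) = 1 by omega), pvGet1, pvSet1]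
      simp [h0, h1]
    · rw [if_neg (show ¬ ((0:Int) + (n0:Int) = 1) by omega), pvGet1, pvSet1]
      simp [h0, h1]
  · rw [if_neg (show ¬ ((0:Int) + (n1:Int) = 1) by omega)]
    by_cases h0 : n0 = 1
    · rw [if_pos (show (0:Int) + (n0:Int) = 1 by omega)]
      simp [h0, h1]
    · rw [if_neg (show ¬ ((0:Int) + (n0:Int) = 1) by omega)]
      simp [h0, h1]

theorem pvCountLoop (graph : PySem.Dict Int (PySem.Set Int)) (T : List (PySem.Set Int)) :
    ∀ (a b : Int),
    T.foldl (fun (count : List Int) tree =>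
      let rc := tree.foldl (fun (st : List Int × List (Option Int)) node =>
        let t := pvTreeType graph node
        (PySem.List.pySetD st.1 t (PySem.List.pyGetD st.1 t 0 + 1),
         PySem.List.pySetD st.2 t (some node))) ([0, 0], [none, none])
      let count1 := if PySem.List.pyGetD rc.1 0 0 = 1
        then PySem.List.pySetD count 0 (PySem.List.pyGetD count 0 0 + 1) else count
      if PySem.List.pyGetD rc.1 1 0 = 1
        then PySem.List.pySetD count1 1 (PySem.List.pyGetD count1 1 0 + 1) else count1) [a, b]
    = [a + (T.countP (fun t => t.countP (pvP0 graph) == 1) : Int),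
       b + (T.countP (fun t => t.countP (fun v => !pvP0 graph v) == 1) : Int)] := by
  induction T with
  | nil => intro a b; simp
  | cons tree T ih =>
    intro a b
    simp only [List.foldl_cons]
    rw [pvCountStep, ih, List.countP_cons, List.countP_cons]
    by_cases h0 : tree.countP (pvP0 graph) = 1 <;>
      by_cases h1 : tree.countP (fun v => !pvP0 graph v) = 1 <;>
        simp [h0, h1] <;> omega


theorem pvReachSymm (g : PySem.Dict Int (PySem.Set Int))
    (hsym : ∀ u v, AdjG g u v → AdjG g v u) (a b : Int) (h : ReachG g a b) : ReachG g b a :=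
  Relation.ReflTransGen.symmetric (fun {u v} hx => hsym u v hx) h

theorem pvOuter (g : PySem.Dict Int (PySem.Set Int))
    (hsym : ∀ u v, AdjG g u v → AdjG g v u)
    (hcl : ∀ u v, AdjG g u v → v ∈ g.keys) :
    ∀ (ks : List Int), (∀ k ∈ ks, k ∈ g.keys) →
    ∀ (VA VB : PySem.Set Int) (trees : List (PySem.Set Int)) (c0 c1 : Int),
    VA.Nodup →
    (∀ x, x ∈ VA ↔ x ∈ VB) →
    (∀ x ∈ VA, ∀ y, ReachG g x y → y ∈ VA) →
    ∃ (T : List (PySem.Set Int)) (VA' VB' : PySem.Set Int),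
      ks.foldl (fun (st : List (PySem.Set Int) × PySem.Set Int) node =>
        if PySem.Set.contains st.2 node then st
        else
          let r := pvBFS g st.2 (PySem.Set.ofList [node]) [node]
          (st.1 ++ [r.2], r.1)) (trees, VA) = (trees ++ T, VA') ∧
      ks.foldl (fun (st : Int × Int × PySem.Set Int) n =>
        if PySem.Set.contains st.2.2 n then st
        else
          let comp := pvSaturate g (PySem.Set.ofList [n]) g.keys.length
          let t0 := comp.foldl (fun (acc : Int) v =>
            if PySem.Int.mod v 2 = PySem.Int.mod (PySem.Set.len (g.getD v PySem.Set.empty)) 2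
              then acc + 1 else acc) 0
          (if t0 = 1 then st.1 + 1 else st.1,
           (if PySem.Set.len comp - t0 = 1 then st.2.1 + 1 else st.2.1),
           PySem.Set.union st.2.2 comp)) (c0, c1, VB)
        = (c0 + (T.countP (fun t => t.countP (pvP0 g) == 1) : Int),
           c1 + (T.countP (fun t => t.countP (fun v => !pvP0 g v) == 1) : Int), VB') := by
  intro ks
  induction ks with
  | nil =>
    intro _ VA VB trees c0 c1 _ _ _
    exact ⟨[], VA, VB, by simp, by simp⟩
  | cons k ks ih =>
    intro hks VA VB trees c0 c1 hnd hVAB hVcl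
    by_cases hk : k ∈ VA
    · have hA : PySem.Set.contains VA k = true := (PySem.Set.contains_iff _ _).2 hk
      have hB : PySem.Set.contains VB k = true := (PySem.Set.contains_iff _ _).2 ((hVAB k).1 hk)
      simp only [List.foldl_cons, hA, hB, if_true]
      exact ih (fun x hx => hks x (List.mem_cons_of_mem _ hx)) VA VB trees c0 c1 hnd hVAB hVcl
    · have hkB : k ∉ VB := fun h => hk ((hVAB k).2 h)
      have hA : PySem.Set.contains VA k = false := by
        cases hc : PySem.Set.contains VA k
        · rfl
        · exact absurd ((PySem.Set.contains_iff _ _).1 hc) hk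
      have hB : PySem.Set.contains VB k = false := by
        cases hc : PySem.Set.contains VB k
        · rfl
        · exact absurd ((PySem.Set.contains_iff _ _).1 hc) hkB
      simp only [List.foldl_cons, hA, hB, Bool.false_eq_true, if_false]
      -- BFS result for this component
      have hV0r : ∀ x, ReachG g k x → x ∉ VA := by
        intro x hr hx
        exact hk (hVcl x hx k (pvReachSymm g hsym k x hr))
      have hofl : PySem.Set.ofList [k] = [k] := rfl
      have hbfs := pvBFS_spec g k VA hV0r VA (PySem.Set.ofList [k]) [k] hnd
        (by rw [hofl]; simp)
        (fun x hx => hx)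
        (by rw [hofl]; intro x hx; simp at hx; subst hx; exact Relation.ReflTransGen.refl)
        (by rw [hofl]; intro x hx; exact hx)
        (by rw [hofl]; intro x hx; simp at hx; subst hx; exact Or.inr (by simp))
        (fun x hx => Or.inl hx)
        (fun u hu huV0 c hadj => absurd hu huV0)
        (by rw [hofl]; simp)
      obtain ⟨hndT, hmemT, hndV, hmemV⟩ := hbfs
      -- saturation result for this component
      have hsat := pvSaturate_spec g hcl k g.keys.length (PySem.Set.ofList [k])
        (by rw [hofl]; simp)
        (by rw [hofl]; intro x hx; simp at hx; subst hx; exact Relation.ReflTransGen.refl)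
        (by rw [hofl]; simp)
        (by rw [hofl]; intro x hx; simp at hx; subst hx; exact hks _ List.mem_cons_self)
        (by rw [hofl]; simp)
      obtain ⟨hndC, hmemC⟩ := hsat
      -- the BFS tree and the saturated component are the same set
      have hperm : (pvBFS g VA (PySem.Set.ofList [k]) [k]).2.Perm
          (pvSaturate g (PySem.Set.ofList [k]) g.keys.length) :=
        (List.perm_ext_iff_of_nodup hndT hndC).2 (fun x => by rw [hmemT x, hmemC x])
      -- apply the induction hypothesis to the advanced states
      obtain ⟨T', VA', VB', hAeq, hBeq⟩ :=
        ih (fun x hx => hks x (List.mem_cons_of_mem _ hx))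
          (pvBFS g VA (PySem.Set.ofList [k]) [k]).1
          (PySem.Set.union VB (pvSaturate g (PySem.Set.ofList [k]) g.keys.length))
          (trees ++ [(pvBFS g VA (PySem.Set.ofList [k]) [k]).2])
          (if (pvSaturate g (PySem.Set.ofList [k]) g.keys.length).foldl
              (fun (acc : Int) v => if PySem.Int.mod v 2
                  = PySem.Int.mod (PySem.Set.len (g.getD v PySem.Set.empty)) 2
                then acc + 1 else acc) 0 = 1 then c0 + 1 else c0)
          (if PySem.Set.len (pvSaturate g (PySem.Set.ofList [k]) g.keys.length)
              - (pvSaturate g (PySem.Set.ofList [k]) g.keys.length).foldl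
              (fun (acc : Int) v => if PySem.Int.mod v 2
                  = PySem.Int.mod (PySem.Set.len (g.getD v PySem.Set.empty)) 2
                then acc + 1 else acc) 0 = 1 then c1 + 1 else c1)
          hndV
          (fun x => by
            rw [hmemV x, PySem.Set.mem_union]
            exact or_congr (hVAB x) (by rw [hmemT x, hmemC x]))
          (fun x hx y hr => by
            rcases (hmemV x).1 hx with h | h
            · exact (hmemV y).2 (Or.inl (hVcl x h y hr))
            · exact (hmemV y).2 (Or.inr ((hmemT y).2
                (Relation.ReflTransGen.trans ((hmemT x).1 h) hr))))
      refine ⟨(pvBFS g VA (PySem.Set.ofList [k]) [k]).2 :: T', VA', VB', ?_, ?_⟩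
      · rw [hAeq]
        simp
      · rw [hBeq]
        -- translate the two per-component conditions
        have ht0 : (pvSaturate g (PySem.Set.ofList [k]) g.keys.length).foldl
            (fun (acc : Int) v => if PySem.Int.mod v 2
                = PySem.Int.mod (PySem.Set.len (g.getD v PySem.Set.empty)) 2
              then acc + 1 else acc) 0
            = 0 + ((pvSaturate g (PySem.Set.ofList [k]) g.keys.length).countP (pvP0 g) : Int) :=
          PySem.List.foldl_ite_add_one _ _ 0
        have hcnt : (pvSaturate g (PySem.Set.ofList [k]) g.keys.length).countP (pvP0 g)
            = (pvBFS g VA (PySem.Set.ofList [k]) [k]).2.countP (pvP0 g) :=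
          (hperm.countP_eq _).symm
        have hlen : (pvSaturate g (PySem.Set.ofList [k]) g.keys.length).length
            = (pvBFS g VA (PySem.Set.ofList [k]) [k]).2.length := hperm.length_eq.symm
        have hsplit2 : (pvBFS g VA (PySem.Set.ofList [k]) [k]).2.length
            = (pvBFS g VA (PySem.Set.ofList [k]) [k]).2.countP (pvP0 g)
              + (pvBFS g VA (PySem.Set.ofList [k]) [k]).2.countP (fun v => !pvP0 g v) := by
          rw [List.length_eq_countP_add_countP (pvP0 g)]
          congr 1
          exact List.countP_congr (fun x _ => by cases pvP0 g x <;> simp)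
        have hslen : PySem.Set.len (pvSaturate g (PySem.Set.ofList [k]) g.keys.length)
            = ((pvSaturate g (PySem.Set.ofList [k]) g.keys.length).length : Int) := by
          simp [PySem.Set.len, pysem]
        rw [List.countP_cons, List.countP_cons]
        by_cases hq0 : (pvBFS g VA (PySem.Set.ofList [k]) [k]).2.countP (pvP0 g) = 1
        · rw [if_pos (by rw [ht0, hcnt, hq0] <;> norm_num)]
          by_cases hq1 : (pvBFS g VA (PySem.Set.ofList [k]) [k]).2.countP
              (fun v => !pvP0 g v) = 1
          · rw [if_pos (by rw [hslen, ht0, hcnt] <;> omega)]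
            simp [hq0, hq1] <;> omega
          · rw [if_neg (by rw [hslen, ht0, hcnt] <;> omega)]
            simp [hq0, hq1] <;> omega
        · rw [if_neg (by rw [ht0, hcnt] <;> omega)]
          by_cases hq1 : (pvBFS g VA (PySem.Set.ofList [k]) [k]).2.countP
              (fun v => !pvP0 g v) = 1
          · rw [if_pos (by rw [hslen, ht0, hcnt] <;> omega)]
            simp [hq0, hq1] <;> omega
          · rw [if_neg (by rw [hslen, ht0, hcnt] <;> omega)]
            simp [hq0, hq1]

-- ===== VERDICT (by name: the statement is the Claim_ definition above) =====

theorem solution_spec : Claim_equal_solution := by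
  intro nodes edges hdom hpre
  unfold Spec_solution
  have hkeys := (pvBuild_keys nodes edges hpre).1
  have hsym : ∀ u v, AdjG (pvBuildGraph nodes edges) u v →
      AdjG (pvBuildGraph nodes edges) v u := by
    intro u v h
    rw [pvAdj_char] at h ⊢
    obtain ⟨e, he, hor⟩ := h
    exact ⟨e, he, hor.symm⟩
  have hcl : ∀ u v, AdjG (pvBuildGraph nodes edges) u v →
      v ∈ (pvBuildGraph nodes edges).keys := by
    intro u v h
    rw [pvAdj_char] at h
    obtain ⟨e, he, hor⟩ := h
    rcases hpre e he with ⟨_, hmem⟩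
    rw [hkeys v]
    rcases hor with rfl | rfl
    · exact hmem v (by simp)
    · exact hmem v (by simp)
  obtain ⟨T, VA', VB', hAeq, hBeq⟩ := pvOuter (pvBuildGraph nodes edges) hsym hcl
    (pvBuildGraph nodes edges).keys (fun k hk => hk)
    PySem.Set.empty PySem.Set.empty [] 0 0
    (by simp [PySem.Set.empty])
    (fun x => Iff.rfl)
    (by simp [PySem.Set.empty])
  show solution nodes edges = solution_alt nodes edges
  unfold solution solution_alt pvFindTrees
  simp only []
  rw [hAeq, hBeq]
  simp only [List.nil_append]
  rw [pvCountLoop (pvBuildGraph nodes edges) T 0 0]
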